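-- pv_equiv track=rewrite | github.com/SergiuUngureanu001/daily-task-manager | nodes.py | _fuzzy_keyword_overlap
-- ===== SOURCE A (Python) =====
-- def _fuzzy_match(a: str, b: str) -> bool:
--     """
--     Check if two words are close enough to be considered a match.
--     Uses prefix matching to handle spelling variants like
--     'dostoyevsky' vs 'dostoviesky'. Requires both words to be long
--     enough and share a substantial prefix to avoid false positives
--     like 'comput' matching 'compete'.
--     """
--     if a == b:
--         return True
--     # Both words must be at least 5 chars to fuzzy match (short words need exact)
--     if len(a) < 5 or len(b) < 5:
--         return False
--     # Require a 5-char prefix match and similar length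
--     if a[:5] == b[:5] and abs(len(a) - len(b)) <= 3:
--         return True
--     return False
--
-- def _fuzzy_keyword_overlap(kw_a: set[str], kw_b: set[str]) -> int:
--     """
--     Count the number of fuzzy-matching keywords between two sets.
--     Uses exact match first, then falls back to _fuzzy_match for remaining words.
--     """
--     # Exact matches
--     exact = kw_a & kw_b
--     count = len(exact)
--     # Fuzzy matches for remaining
--     remaining_a = kw_a - exact
--     remaining_b = kw_b - exact
--     used_b = set()
--     for wa in remaining_a:
--         for wb in remaining_b:
--             if wb not in used_b and _fuzzy_match(wa, wb):
--                 count += 1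
--                 used_b.add(wb)
--                 break
--     return count
-- ===== SOURCE B (Python) =====
-- def _fuzzy_keyword_overlap(kw_a: set[str], kw_b: set[str]) -> int:
--     """Prefix-indexed variant: bucket remaining_b by 5-char prefix once, then
--     each word of remaining_a scans only its own bucket instead of all of
--     remaining_b."""
--     exact = kw_a & kw_b
--     count = len(exact)
--     remaining_a = kw_a - exact
--     remaining_b = kw_b - exact
--     buckets = {}
--     for wb in remaining_b:
--         if len(wb) >= 5:
--             buckets.setdefault(wb[:5], []).append(wb)
--     used_b = set()
--     for wa in remaining_a:
--         if len(wa) < 5: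
--             continue
--         for wb in buckets.get(wa[:5], []):
--             if wb not in used_b and abs(len(wa) - len(wb)) <= 3:
--                 count += 1
--                 used_b.add(wb)
--                 break
--     return count
-- ===== Notes on version B (the rewrite author's own statement) =====
-- stated objective: faster
-- what changed: Replaced the full inner scan of remaining_b for every word of remaining_a by a dict of buckets keyed on the 5-char prefix, built in one pass over remaining_b, so each word of remaining_a only scans its own prefix bucket.
import Mathlib
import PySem

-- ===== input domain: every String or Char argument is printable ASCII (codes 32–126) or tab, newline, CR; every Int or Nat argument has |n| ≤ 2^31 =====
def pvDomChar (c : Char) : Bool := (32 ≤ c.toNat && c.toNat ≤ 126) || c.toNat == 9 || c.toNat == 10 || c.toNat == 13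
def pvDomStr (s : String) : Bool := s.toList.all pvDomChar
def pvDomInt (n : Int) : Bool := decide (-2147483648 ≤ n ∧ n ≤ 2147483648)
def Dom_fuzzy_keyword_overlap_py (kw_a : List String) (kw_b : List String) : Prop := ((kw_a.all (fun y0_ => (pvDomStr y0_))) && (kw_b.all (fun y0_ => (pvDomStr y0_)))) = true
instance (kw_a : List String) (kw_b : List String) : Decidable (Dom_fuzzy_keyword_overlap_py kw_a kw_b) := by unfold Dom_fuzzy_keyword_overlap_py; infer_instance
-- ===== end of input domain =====

-- B replaces A's full inner scan of remaining_b with a dict of 5-char-prefix buckets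
-- built in one pass, so each remaining_a word scans only its own bucket (faster).


-- ===== PORT A =====
-- _fuzzy_match, transliterated
def pvFuzzyMatch (a : String) (b : String) : Bool :=
  if a == b then true
  else if PySem.Str.len a < 5 || PySem.Str.len b < 5 then false
  else if (PySem.Str.slice a none (some 5) == PySem.Str.slice b none (some 5))
          && decide (|PySem.Str.len a - PySem.Str.len b| ≤ 3) then true
  else false

-- A's inner 'for wb in remaining_b: … break' loop
def pvInnerA (wa : String) (rb : List String) (used : PySem.Set String) (count : Int) :
    Int × PySem.Set String :=
  match rb with
  | [] => (count, used)
  | wb :: rest =>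
    if (!PySem.Set.contains used wb) && pvFuzzyMatch wa wb then (count + 1, PySem.Set.add used wb)
    else pvInnerA wa rest used count

def fuzzy_keyword_overlap_py (kw_a : List String) (kw_b : List String) : Int :=
  let exact := PySem.Set.inter kw_a kw_b
  let count : Int := PySem.Set.len exact
  let remaining_a := PySem.Set.diff kw_a exact
  let remaining_b := PySem.Set.diff kw_b exact
  (remaining_a.foldl (fun (st : Int × PySem.Set String) wa => pvInnerA wa remaining_b st.2 st.1)
    (count, PySem.Set.empty)).1

-- ===== PORT B =====
def pvPref5 (w : String) : String := PySem.Str.slice w none (some 5)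

-- B's scan of one prefix bucket ('for wb in buckets.get(wa[:5], []): … break')
def pvInnerB (wa : String) (bucket : List String) (used : PySem.Set String) (count : Int) :
    Int × PySem.Set String :=
  match bucket with
  | [] => (count, used)
  | wb :: rest =>
    if (!PySem.Set.contains used wb) && decide (|PySem.Str.len wa - PySem.Str.len wb| ≤ 3) then
      (count + 1, PySem.Set.add used wb)
    else pvInnerB wa rest used count

def fuzzy_keyword_overlap_py_alt (kw_a : List String) (kw_b : List String) : Int :=
  let exact := PySem.Set.inter kw_a kw_b
  let count : Int := PySem.Set.len exact
  let remaining_a := PySem.Set.diff kw_a exact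
  let remaining_b := PySem.Set.diff kw_b exact
  let buckets := remaining_b.foldl
    (fun (d : PySem.Dict String (List String)) wb =>
      if 5 ≤ PySem.Str.len wb then d.modify (pvPref5 wb) [] (· ++ [wb]) else d)
    PySem.Dict.empty
  (remaining_a.foldl (fun (st : Int × PySem.Set String) wa =>
      if PySem.Str.len wa < 5 then st
      else pvInnerB wa (buckets.getD (pvPref5 wa) []) st.2 st.1)
    (count, PySem.Set.empty)).1

-- ===== PRECONDITION & SPEC =====
def Spec_fuzzy_keyword_overlap_py (kw_a : List String) (kw_b : List String) (out : Int) : Prop := out = fuzzy_keyword_overlap_py_alt kw_a kw_b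
instance (kw_a : List String) (kw_b : List String) (out : Int) : Decidable (Spec_fuzzy_keyword_overlap_py kw_a kw_b out) := by unfold Spec_fuzzy_keyword_overlap_py; infer_instance

-- ===== CLAIM (what is proved, stated in full; the proofs are below) =====
def Claim_equal_fuzzy_keyword_overlap_py : Prop := ∀ (kw_a : List String) (kw_b : List String), Dom_fuzzy_keyword_overlap_py kw_a kw_b → Spec_fuzzy_keyword_overlap_py kw_a kw_b (fuzzy_keyword_overlap_py kw_a kw_b)

-- ===== LEMMAS AND PROOFS =====

-- pvFuzzyMatch on two distinct long words with equal 5-prefixes reduces to the length test.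
theorem pv_match_long (wa wb : String) (hwa : wa ≠ wb)
    (hlen : ¬ PySem.Str.len wa < 5) (h5 : 5 ≤ PySem.Str.len wb)
    (hp : pvPref5 wb = pvPref5 wa) :
    pvFuzzyMatch wa wb = decide (|PySem.Str.len wa - PySem.Str.len wb| ≤ 3) := by
  have hsl := hp.symm
  unfold pvPref5 at hsl
  unfold pvFuzzyMatch
  rw [if_neg (by simpa using hwa),
      if_neg (by rw [decide_eq_false hlen, decide_eq_false (not_lt.mpr h5)]; simp)]
  rw [show (PySem.Str.slice wa none (some 5) == PySem.Str.slice wb none (some 5)) = true from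
        beq_iff_eq.mpr hsl, Bool.true_and]
  by_cases habs : |PySem.Str.len wa - PySem.Str.len wb| ≤ 3
  · rw [decide_eq_true habs]; simp
  · rw [decide_eq_false habs]; simp

-- pvFuzzyMatch is false when the words differ and either is short or the prefixes differ.
theorem pv_match_false (wa wb : String) (hwa : wa ≠ wb)
    (h : PySem.Str.len wa < 5 ∨ PySem.Str.len wb < 5 ∨ pvPref5 wb ≠ pvPref5 wa) :
    pvFuzzyMatch wa wb = false := by
  unfold pvFuzzyMatch
  rw [if_neg (by simpa using hwa)]
  by_cases hshort : (decide (PySem.Str.len wa < 5) || decide (PySem.Str.len wb < 5)) = true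
  · rw [if_pos hshort]
  · rw [if_neg hshort]
    have hp : pvPref5 wb ≠ pvPref5 wa := by
      rcases h with h | h | h
      · exact absurd (by rw [decide_eq_true h]; simp) hshort
      · exact absurd (by rw [decide_eq_true h]; simp) hshort
      · exact h
    have hsl : (PySem.Str.slice wa none (some 5) == PySem.Str.slice wb none (some 5)) = false := by
      rw [beq_eq_false_iff_ne]
      intro h'
      exact hp (by unfold pvPref5; exact h'.symm)
    rw [hsl, Bool.false_and, if_neg (by simp)]

-- The bucket dict groups exactly the long words of rb by prefix, in rb's order.
theorem pv_buckets_getD (rb : List String) (d : PySem.Dict String (List String)) (p : String) :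
    (rb.foldl (fun (d : PySem.Dict String (List String)) wb =>
        if 5 ≤ PySem.Str.len wb then d.modify (pvPref5 wb) [] (· ++ [wb]) else d) d).getD p []
      = d.getD p [] ++ rb.filter (fun wb => 5 ≤ PySem.Str.len wb && pvPref5 wb == p) := by
  induction rb generalizing d with
  | nil => simp
  | cons wb rest ih =>
    simp only [List.foldl_cons, List.filter_cons]
    by_cases h5 : (5:Int) ≤ PySem.Str.len wb
    · rw [if_pos h5, ih, PySem.Dict.getD_modify]
      rw [show (decide (5 ≤ PySem.Str.len wb) && (pvPref5 wb == p)) = (pvPref5 wb == p) by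
        rw [decide_eq_true h5, Bool.true_and]]
      by_cases hp : pvPref5 wb = p
      · rw [if_pos hp.symm, hp]
        simp
      · rw [if_neg (fun h => hp h.symm), if_neg (by simpa using hp)]
    · rw [if_neg h5, ih,
        show (decide (5 ≤ PySem.Str.len wb) && (pvPref5 wb == p)) = false by
          rw [decide_eq_false h5, Bool.false_and], if_neg (by simp)]

-- For a long wa distinct from every word of rb, A's scan of rb equals B's scan of wa's bucket.
theorem pv_inner_eq (wa : String) (rb : List String) (used : PySem.Set String) (count : Int)
    (hlen : ¬ PySem.Str.len wa < 5) (hne : ∀ wb ∈ rb, wa ≠ wb) :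
    pvInnerA wa rb used count
      = pvInnerB wa (rb.filter (fun wb => 5 ≤ PySem.Str.len wb && pvPref5 wb == pvPref5 wa)) used count := by
  induction rb generalizing used count with
  | nil => simp [pvInnerA, pvInnerB]
  | cons wb rest ih =>
    have hwa : wa ≠ wb := hne wb (by simp)
    have hrest : ∀ w ∈ rest, wa ≠ w := fun w hw => hne w (by simp [hw])
    simp only [pvInnerA, List.filter_cons]
    by_cases h5 : (5:Int) ≤ PySem.Str.len wb
    · by_cases hp : pvPref5 wb = pvPref5 wa
      · rw [pv_match_long wa wb hwa hlen h5 hp,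
          show (decide (5 ≤ PySem.Str.len wb) && (pvPref5 wb == pvPref5 wa)) = true by
            rw [decide_eq_true h5, Bool.true_and]; exact beq_iff_eq.mpr hp,
          if_pos rfl]
        simp only [pvInnerB]
        by_cases hc : ((!PySem.Set.contains used wb)
            && decide (|PySem.Str.len wa - PySem.Str.len wb| ≤ 3)) = true
        · rw [if_pos hc, if_pos hc]
        · rw [if_neg hc, if_neg hc]; exact ih used count hrest
      · rw [pv_match_false wa wb hwa (Or.inr (Or.inr hp)), Bool.and_false,
          show (decide (5 ≤ PySem.Str.len wb) && (pvPref5 wb == pvPref5 wa)) = false by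
            rw [beq_eq_false_iff_ne.mpr hp, Bool.and_false],
          if_neg (by simp), if_neg (by simp)]
        exact ih used count hrest
    · rw [pv_match_false wa wb hwa (Or.inr (Or.inl (not_le.mp h5))), Bool.and_false,
        show (decide (5 ≤ PySem.Str.len wb) && (pvPref5 wb == pvPref5 wa)) = false by
          rw [decide_eq_false h5, Bool.false_and],
        if_neg (by simp), if_neg (by simp)]
      exact ih used count hrest

-- A short wa (distinct from all of rb) matches nothing: A's inner loop is a no-op.
theorem pv_inner_short (wa : String) (rb : List String) (used : PySem.Set String) (count : Int)
    (hlen : PySem.Str.len wa < 5) (hne : ∀ wb ∈ rb, wa ≠ wb) :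
    pvInnerA wa rb used count = (count, used) := by
  induction rb with
  | nil => simp [pvInnerA]
  | cons wb rest ih =>
    have hwa : wa ≠ wb := hne wb (by simp)
    rw [pvInnerA, pv_match_false wa wb hwa (Or.inl hlen), Bool.and_false, if_neg (by simp)]
    exact ih (fun w hw => hne w (by simp [hw]))

-- Words surviving kw_a - exact are distinct from all words surviving kw_b - exact.
theorem pv_disjoint (kw_a kw_b : List String)
    (wa : String) (ha : wa ∈ PySem.Set.diff kw_a (PySem.Set.inter kw_a kw_b))
    (wb : String) (hb : wb ∈ PySem.Set.diff kw_b (PySem.Set.inter kw_a kw_b)) : wa ≠ wb := by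
  intro h; subst h
  rw [PySem.Set.mem_diff] at ha hb
  exact ha.2 ((PySem.Set.mem_inter _ _ _).mpr ⟨ha.1, hb.1⟩)

-- Main-loop equivalence: fold over ra from any start state.
theorem pv_fold_eq (rb : List String) (ra : List String) (st : Int × PySem.Set String)
    (hne : ∀ wa ∈ ra, ∀ wb ∈ rb, wa ≠ wb) :
    ra.foldl (fun (st : Int × PySem.Set String) wa => pvInnerA wa rb st.2 st.1) st
      = ra.foldl (fun (st : Int × PySem.Set String) wa =>
          if PySem.Str.len wa < 5 then st
          else pvInnerB wa ((rb.foldl (fun (d : PySem.Dict String (List String)) wb =>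
              if 5 ≤ PySem.Str.len wb then d.modify (pvPref5 wb) [] (· ++ [wb]) else d)
              PySem.Dict.empty).getD (pvPref5 wa) []) st.2 st.1) st := by
  induction ra generalizing st with
  | nil => rfl
  | cons wa rest ih =>
    have hwa : ∀ wb ∈ rb, wa ≠ wb := hne wa (by simp)
    have hrest : ∀ w ∈ rest, ∀ wb ∈ rb, w ≠ wb := fun w hw => hne w (by simp [hw])
    simp only [List.foldl_cons]
    rw [ih _ hrest]
    · congr 1
      by_cases hlen : PySem.Str.len wa < 5
      · rw [if_pos hlen, pv_inner_short wa rb st.2 st.1 hlen hwa]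
      · rw [if_neg hlen, pv_inner_eq wa rb st.2 st.1 hlen hwa, pv_buckets_getD]
        simp

-- ===== VERDICT (by name: the statement is the Claim_ definition above) =====
theorem fuzzy_keyword_overlap_py_spec : Claim_equal_fuzzy_keyword_overlap_py := by
  intro kw_a kw_b _
  show fuzzy_keyword_overlap_py kw_a kw_b = fuzzy_keyword_overlap_py_alt kw_a kw_b
  unfold fuzzy_keyword_overlap_py fuzzy_keyword_overlap_py_alt
  simp only
  rw [pv_fold_eq]
  exact fun wa ha wb hb => pv_disjoint kw_a kw_b wa ha wb hb
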